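-- pv_equiv track=rewrite | github.com/CCEMGroupTCD/DARTassembler | src05_Assembly_Refactor/ligands.py | get_ligand_dic
-- ===== SOURCE A (Python) =====
-- from copy import deepcopy
--
-- def get_ligand_dic(dic_1, dic_2):
--     tmp_dic_3 = {}  # tmp_dic_3 is a dictionary with keys (denticity) and  value (dictionary). This dictionary has keys (unique charge) and values(ligand building blocks))
--     for denticity, charge_list, ligand_list in zip(dic_1.keys(), dic_1.values(), dic_2.values()):
--         tmp_dic_charge = {}
--         for unq_charge in set(charge_list):
--             tmp_list = []
--             for charge, ligand in zip(charge_list, ligand_list):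
--                 if str(unq_charge) == str(charge):
--                     tmp_list.append(ligand)
--                 else:
--                     pass
--             tmp_dic_charge.update({f"{unq_charge}": tmp_list})
--         tmp_dic_3.update({f"{denticity}": deepcopy(tmp_dic_charge)})
--     return tmp_dic_3
-- ===== SOURCE B (Python) =====
-- from copy import deepcopy
--
-- def get_ligand_dic(dic_1, dic_2):
--     # One linear grouping pass per denticity instead of a full scan per unique charge.
--     out = {}
--     for (denticity, charge_list), ligand_list in zip(dic_1.items(), dic_2.values()):
--         groups = {charge: [] for charge in charge_list}
--         for charge, ligand in zip(charge_list, ligand_list):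
--             groups[charge].append(ligand)
--         out[str(denticity)] = {str(charge): deepcopy(ligands)
--                                for charge, ligands in groups.items()}
--     return out
-- ===== Notes on version B (the rewrite author's own statement) =====
-- stated objective: alternative
-- what changed: Instead of scanning the whole (charge, ligand) zip once per unique charge, B pre-seeds one int-keyed dict with an empty list per distinct charge and distributes the ligands in a single linear pass, stringifying the keys at the end.
import Mathlib
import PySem

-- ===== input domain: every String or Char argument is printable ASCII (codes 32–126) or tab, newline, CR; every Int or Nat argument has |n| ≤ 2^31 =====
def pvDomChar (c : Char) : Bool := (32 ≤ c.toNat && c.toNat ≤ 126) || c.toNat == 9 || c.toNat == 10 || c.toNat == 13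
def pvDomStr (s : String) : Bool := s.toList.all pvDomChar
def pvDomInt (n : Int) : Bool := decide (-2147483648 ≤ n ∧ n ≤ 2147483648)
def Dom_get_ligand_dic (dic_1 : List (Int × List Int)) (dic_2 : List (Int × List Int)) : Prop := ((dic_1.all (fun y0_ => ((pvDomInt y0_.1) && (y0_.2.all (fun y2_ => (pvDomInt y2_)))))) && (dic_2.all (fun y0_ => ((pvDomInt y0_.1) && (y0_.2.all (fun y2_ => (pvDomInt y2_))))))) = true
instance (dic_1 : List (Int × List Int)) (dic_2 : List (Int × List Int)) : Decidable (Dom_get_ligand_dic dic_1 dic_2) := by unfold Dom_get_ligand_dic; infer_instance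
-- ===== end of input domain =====

-- B groups each denticity's ligands by charge in ONE pass over zip(charge_list, ligand_list)
-- (a dict pre-seeded with an empty list per distinct charge), instead of A's full rescan of the
-- zip per unique charge. The inner dicts are emitted in first-occurrence order of the charges; the
-- Python builds them in set-iteration order, which dict comparison ignores.

-- ===== PORT A =====
def get_ligand_dic (dic_1 : List (Int × List Int)) (dic_2 : List (Int × List Int)) : List (String × List (String × List Int)) :=
  let d1 := PySem.Dict.ofList dic_1
  let d2 := PySem.Dict.ofList dic_2
  -- for denticity, charge_list, ligand_list in zip(dic_1.keys(), dic_1.values(), dic_2.values())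
  let tmp_dic_3 : PySem.Dict String (List (String × List Int)) :=
    (List.zip (List.zip d1.keys d1.values) d2.values).foldl
      (fun acc t =>
        -- tmp_dic_charge: for unq_charge in set(charge_list), scan zip(charge_list, ligand_list)
        acc.insert (PySem.Int.toStr t.1.1)
          ((PySem.Set.ofList t.1.2).foldl
            (fun dc unq =>
              dc.insert (PySem.Int.toStr unq)
                ((List.zip t.1.2 t.2).foldl
                  (fun tl p => if PySem.Int.toStr unq == PySem.Int.toStr p.1 then tl ++ [p.2] else tl)
                  []))
            PySem.Dict.empty).items)
      PySem.Dict.empty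
  tmp_dic_3.items

-- ===== PORT B =====
def get_ligand_dic_alt (dic_1 : List (Int × List Int)) (dic_2 : List (Int × List Int)) : List (String × List (String × List Int)) :=
  let d1 := PySem.Dict.ofList dic_1
  let d2 := PySem.Dict.ofList dic_2
  (List.zip d1.items d2.values).map
    (fun t =>
      -- groups = {charge: [] for charge in charge_list}; then one appending pass over the zip
      let groups : PySem.Dict Int (List Int) :=
        (List.zip t.1.2 t.2).foldl
          (fun g p => g.modify p.1 [] (· ++ [p.2]))
          (t.1.2.foldl (fun g c => g.insert c []) PySem.Dict.empty)
      (PySem.Int.toStr t.1.1, groups.items.map (fun p => (PySem.Int.toStr p.1, p.2))))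

-- ===== PRECONDITION & SPEC =====
def Spec_get_ligand_dic (dic_1 : List (Int × List Int)) (dic_2 : List (Int × List Int)) (out : List (String × List (String × List Int))) : Prop := out = get_ligand_dic_alt dic_1 dic_2
instance (dic_1 : List (Int × List Int)) (dic_2 : List (Int × List Int)) (out : List (String × List (String × List Int))) : Decidable (Spec_get_ligand_dic dic_1 dic_2 out) := by unfold Spec_get_ligand_dic; infer_instance

-- ===== CLAIM (what is proved, stated in full; the proofs are below) =====
def Claim_equal_get_ligand_dic : Prop := ∀ (dic_1 : List (Int × List Int)) (dic_2 : List (Int × List Int)), Dom_get_ligand_dic dic_1 dic_2 → Spec_get_ligand_dic dic_1 dic_2 (get_ligand_dic dic_1 dic_2)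

-- ===== LEMMAS AND PROOFS =====

theorem pvDigitChar_inj : ∀ x < 10, ∀ y < 10, Nat.digitChar x = Nat.digitChar y → x = y := by decide

theorem pvToDigits10_inj : ∀ (a b : Nat), Nat.toDigits 10 a = Nat.toDigits 10 b → a = b := by
  intro a
  induction a using Nat.strong_induction_on with
  | _ a ih =>
    intro b h
    rw [@Nat.toDigits_eq_if 10 a (by norm_num)] at h
    rw [@Nat.toDigits_eq_if 10 b (by norm_num)] at h
    by_cases ha : a < 10 <;> by_cases hb : b < 10
    · rw [if_pos ha, if_pos hb] at h
      injection h with h1 _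
      exact pvDigitChar_inj a ha b hb h1
    · rw [if_pos ha, if_neg hb] at h
      have hl := congrArg List.length h
      simp only [List.length_append, List.length_cons, List.length_nil] at hl
      have := @Nat.length_toDigits_pos 10 (b / 10)
      omega
    · rw [if_neg ha, if_pos hb] at h
      have hl := congrArg List.length h
      simp only [List.length_append, List.length_cons, List.length_nil] at hl
      have := @Nat.length_toDigits_pos 10 (a / 10)
      omega
    · rw [if_neg ha, if_neg hb] at h
      have h2 := List.append_inj' h rfl
      have hd : a / 10 = b / 10 := ih (a / 10) (Nat.div_lt_self (by omega) (by norm_num)) _ h2.1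
      have hm : a % 10 = b % 10 := by
        have h3 := h2.2
        injection h3 with h4 _
        exact pvDigitChar_inj _ (Nat.mod_lt _ (by omega)) _ (Nat.mod_lt _ (by omega)) h4
      omega

theorem pvToChars_inj : ∀ (a b : Int), PySem.Int.toChars a = PySem.Int.toChars b → a = b := by
  intro a b h
  unfold PySem.Int.toChars at h
  have hdig : ∀ (n : Nat) (c : Char), c ∈ Nat.toDigits 10 n → c ≠ '-' := by
    intro n c hc
    have := Nat.isDigit_of_mem_toDigits (by norm_num) (by norm_num) hc
    intro he; rw [he] at this; simp [Char.isDigit] at this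
  split_ifs at h with h1 h2 h2
  · injection h with _ h3
    have := pvToDigits10_inj _ _ h3
    omega
  · exfalso
    have hh : '-' ∈ Nat.toDigits 10 b.toNat := h ▸ List.mem_cons_self
    exact hdig _ _ hh rfl
  · exfalso
    have hh : '-' ∈ Nat.toDigits 10 a.toNat := h.symm ▸ List.mem_cons_self
    exact hdig _ _ hh rfl
  · have := pvToDigits10_inj _ _ h
    omega

theorem pvToStr_inj : Function.Injective PySem.Int.toStr := by
  intro a b h
  exact pvToChars_inj a b (by rw [← PySem.Int.toList_toStr, ← PySem.Int.toList_toStr, h])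

theorem pvMapFstZip {α β : Type} (l : List α) (ws : List β) :
    (List.zip l ws).map Prod.fst = l.take ws.length := by
  induction l generalizing ws with
  | nil => simp
  | cons a t ih => cases ws <;> simp [ih]

theorem pvGetDInsertNil (cs : List Int) (d : PySem.Dict Int (List Int)) (u : Int)
    (h : d.getD u [] = []) :
    (cs.foldl (fun g c => g.insert c []) d).getD u [] = [] := by
  induction cs generalizing d with
  | nil => simpa using h
  | cons c t ih =>
    simp only [List.foldl_cons]
    refine ih _ ?_
    rw [PySem.Dict.getD_insert]
    split
    · rfl
    · exact h

theorem pvSetUpdate_of_mem (xs : List Int) (s : PySem.Set Int) (h : ∀ x ∈ xs, x ∈ s) :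
    PySem.Set.update s xs = s := by
  induction xs generalizing s with
  | nil => rfl
  | cons x t ih =>
    have hadd : PySem.Set.add s x = s := by
      simp [PySem.Set.add, PySem.Set.contains, h x (List.mem_cons_self)]
    show PySem.Set.update (PySem.Set.add s x) t = s
    rw [hadd]
    exact ih s (fun y hy => h y (List.mem_cons_of_mem _ hy))

theorem pvInner (cs ls : List Int) :
    ((PySem.Set.ofList cs).foldl
        (fun dc unq => dc.insert (PySem.Int.toStr unq)
          ((List.zip cs ls).foldl
            (fun tl p => if PySem.Int.toStr unq == PySem.Int.toStr p.1 then tl ++ [p.2] else tl) []))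
        PySem.Dict.empty).items
    = (((List.zip cs ls).foldl (fun g p => g.modify p.1 [] (· ++ [p.2]))
        (cs.foldl (fun g c => g.insert c []) PySem.Dict.empty)).items).map
        (fun p => (PySem.Int.toStr p.1, p.2)) := by
  have hfilt : ∀ u : Int, ∀ p : Int × Int,
      (PySem.Int.toStr u == PySem.Int.toStr p.1) = (p.1 == u) := by
    intro u p
    by_cases he : p.1 = u
    · subst he; simp
    · have hne : PySem.Int.toStr u ≠ PySem.Int.toStr p.1 := fun h => he (pvToStr_inj h.symm)
      simp [he, hne]
  rw [PySem.Dict.items_foldl_insert_fresh (PySem.Set.ofList cs)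
        (fun unq => PySem.Int.toStr unq)
        (fun unq => (List.zip cs ls).foldl
          (fun tl p => if PySem.Int.toStr unq == PySem.Int.toStr p.1 then tl ++ [p.2] else tl) [])
        PySem.Dict.empty
        (by intro a _; simp)
        (List.Nodup.map pvToStr_inj (PySem.Set.nodup_ofList cs))]
  have hkeys0 : (cs.foldl (fun g c => g.insert c []) (PySem.Dict.empty : PySem.Dict Int (List Int))).keys
      = PySem.Set.ofList cs := by
    rw [PySem.Dict.keys_foldl_insert cs (fun _ _ => []) PySem.Dict.empty]
    rw [PySem.Set.ofList_eq_foldl]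
    rfl
  have hkeysD : ((List.zip cs ls).foldl (fun g p => g.modify p.1 [] (· ++ [p.2]))
      (cs.foldl (fun g c => g.insert c []) (PySem.Dict.empty : PySem.Dict Int (List Int)))).keys
      = PySem.Set.ofList cs := by
    rw [PySem.Dict.keys_foldl_modify_key (List.zip cs ls) Prod.fst []
          (fun _ p => (· ++ [p.2]))
          (cs.foldl (fun g c => g.insert c []) PySem.Dict.empty)]
    rw [hkeys0]
    apply pvSetUpdate_of_mem
    intro x hx
    rw [pvMapFstZip] at hx
    exact (PySem.Set.mem_ofList cs x).mpr (List.mem_of_mem_take hx)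
  rw [PySem.Dict.items_eq_map_keys ((List.zip cs ls).foldl (fun g p => g.modify p.1 [] (· ++ [p.2]))
        (cs.foldl (fun g c => g.insert c []) PySem.Dict.empty))
        (by rw [hkeysD]; exact PySem.Set.nodup_ofList cs) []]
  rw [hkeysD, List.map_map]
  simp only [PySem.Dict.empty, List.nil_append]
  apply List.map_congr_left
  intro u _
  simp only [Function.comp_apply]
  rw [PySem.List.foldl_append_if (fun p => PySem.Int.toStr u == PySem.Int.toStr p.1) Prod.snd]
  rw [PySem.Dict.getD_foldl_modify_append]
  rw [pvGetDInsertNil cs _ u (by rfl)]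
  simp only [List.nil_append]
  congr 1
  apply congrArg
  apply List.filter_congr
  intro p _
  exact hfilt u p

theorem pvMain (dic_1 dic_2 : List (Int × List Int)) :
    get_ligand_dic dic_1 dic_2 = get_ligand_dic_alt dic_1 dic_2 := by
  simp only [get_ligand_dic, get_ligand_dic_alt]
  have hzip : List.zip (PySem.Dict.ofList dic_1).keys (PySem.Dict.ofList dic_1).values
      = (PySem.Dict.ofList dic_1).items := by
    simp only [PySem.Dict.keys, PySem.Dict.values]
    rw [List.zip_map']
    simp
  rw [hzip]
  have hnodup : ((List.zip (PySem.Dict.ofList dic_1).items (PySem.Dict.ofList dic_2).values).map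
      (fun t => PySem.Int.toStr t.1.1)).Nodup := by
    have h1 : (List.zip (PySem.Dict.ofList dic_1).items (PySem.Dict.ofList dic_2).values).map
        (fun t => PySem.Int.toStr t.1.1)
        = ((((List.zip (PySem.Dict.ofList dic_1).items (PySem.Dict.ofList dic_2).values).map
            Prod.fst).map Prod.fst).map PySem.Int.toStr) := by
      simp [List.map_map]
    rw [h1, pvMapFstZip, List.map_take]
    refine List.Nodup.map pvToStr_inj ?_
    exact (List.take_sublist _ _).nodup (PySem.Dict.nodup_keys_ofList dic_1)
  rw [PySem.Dict.items_foldl_insert_fresh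
        (List.zip (PySem.Dict.ofList dic_1).items (PySem.Dict.ofList dic_2).values)
        (fun t => PySem.Int.toStr t.1.1)
        (fun t => ((PySem.Set.ofList t.1.2).foldl
            (fun dc unq => dc.insert (PySem.Int.toStr unq)
              ((List.zip t.1.2 t.2).foldl
                (fun tl p => if PySem.Int.toStr unq == PySem.Int.toStr p.1 then tl ++ [p.2] else tl) []))
            PySem.Dict.empty).items)
        PySem.Dict.empty
        (by intro a _; simp)
        hnodup]
  simp only [PySem.Dict.empty, List.nil_append]
  apply List.map_congr_left
  intro t _
  exact congrArg (fun x => (PySem.Int.toStr t.1.1, x)) (pvInner t.1.2 t.2)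

-- ===== VERDICT (by name: the statement is the Claim_ definition above) =====
theorem get_ligand_dic_spec : Claim_equal_get_ligand_dic := by
  intro dic_1 dic_2 _
  unfold Spec_get_ligand_dic
  exact pvMain dic_1 dic_2
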